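-- pv_equiv track=rewrite | github.com/zestsoftware/collective.sendaspdf | collective/sendaspdf/utils.py | decode_parameter
-- ===== SOURCE A (Python) =====
-- def decode_parameter(p):
--     """ Decode a parameter/value from a URL format to
--     a more readable version.
--     Based on table seen in this page.
--     http://www.blooberry.com/indexdot/html/topics/urlencoding.htm
--
--     >>> from collective.sendaspdf.utils import decode_parameter
--     >>> decode_parameter('kikoo%20lol')
--     'kikoo lol'
--
--     Well, if there is nothing to do, we do nothing.
--     >>> decode_parameter('kikoolol')
--     'kikoolol'
--
--     It might mainly be used to decode the 'came_from' parameter.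
--     >>> decode_parameter('http%3A//www.prettigpersoneel.nl/nerull-ii/%3Fview%3Demployees')
--     'http://www.prettigpersoneel.nl/nerull-ii/?view=employees'
--
--     We decode the '%' caracter last so we can not have confusion.
--     >>> decode_parameter('%252C')
--     '%2C'
--
--     If we did not decode it last, we could have obtained ','.
--     """
--     table = {'24': '$',
--              '26': '&',
--              '2C': ',',
--              '2F': '/',
--              '3A': ':',
--              '3B': ';',
--              '3D': '=',
--              '3F': '?',
--              '40': '@',
--              '20': ' ',
--              '22': '"',
--              '3C': '<',
--              '3E': '>',
--              '23': '#',
--              '7B': '{',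
--              '7D': '}',
--              '7C': '|',
--              '5C': '\\',
--              '5E': '^',
--              '7E': '~',
--              '5B': '[',
--              '5D': ']',
--              '60': '`'}
--
--     for k in table:
--         if k == '25':
--             continue
--         p = p.replace('%' + k, table[k])
--     return p.replace('%25', '%')
-- ===== SOURCE B (Python) =====
-- def decode_parameter(p):
--     """Decode the limited set of percent-escapes in one left-to-right pass.
--
--     The table includes '25' -> '%'; since no decoded character is ever
--     re-scanned, this reproduces the original's 'decode %25 last' semantics.
--     """
--     table = {'24': '$',
--              '26': '&',
--              '2C': ',',
--              '2F': '/',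
--              '3A': ':',
--              '3B': ';',
--              '3D': '=',
--              '3F': '?',
--              '40': '@',
--              '20': ' ',
--              '22': '"',
--              '3C': '<',
--              '3E': '>',
--              '23': '#',
--              '7B': '{',
--              '7D': '}',
--              '7C': '|',
--              '5C': '\\',
--              '5E': '^',
--              '7E': '~',
--              '5B': '[',
--              '5D': ']',
--              '60': '`',
--              '25': '%'}
--     out = []
--     i = 0
--     n = len(p)
--     while i < n:
--         code = p[i + 1:i + 3]
--         if p[i] == '%' and code in table:
--             out.append(table[code])
--             i += 3
--         else:
--             out.append(p[i])
--             i += 1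
--     return ''.join(out)
-- ===== Notes on version B (the rewrite author's own statement) =====
-- stated objective: alternative
-- what changed: A makes 24 sequential full-string str.replace passes (one per escape code, with the percent-sign code decoded last); B decodes in a single left-to-right scan using one lookup table that also maps the percent-sign code, never re-scanning emitted output.
import Mathlib
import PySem

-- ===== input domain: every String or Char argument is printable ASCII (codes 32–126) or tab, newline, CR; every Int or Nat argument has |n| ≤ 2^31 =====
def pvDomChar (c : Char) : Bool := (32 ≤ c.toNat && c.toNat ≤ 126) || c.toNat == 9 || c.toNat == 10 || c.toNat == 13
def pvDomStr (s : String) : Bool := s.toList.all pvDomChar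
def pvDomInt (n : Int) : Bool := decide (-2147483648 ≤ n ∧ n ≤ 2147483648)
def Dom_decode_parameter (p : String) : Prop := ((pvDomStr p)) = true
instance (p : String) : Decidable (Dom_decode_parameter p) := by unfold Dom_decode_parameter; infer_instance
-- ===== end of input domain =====

-- B replaces A's 24 sequential full-string str.replace passes by one left-to-right scan with a
-- single code table that includes '25' → '%' and never re-scans its output; same return value.

-- ===== PORT A =====
-- A's dict literal, in insertion order (Python 3.7+ iterates it in this order);
-- iterating `for k in table` with `table[k]` reads exactly these (key, value) pairs
def pvTable : List (String × String) :=
  [("24", "$"), ("26", "&"), ("2C", ","), ("2F", "/"), ("3A", ":"), ("3B", ";"),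
   ("3D", "="), ("3F", "?"), ("40", "@"), ("20", " "), ("22", "\""), ("3C", "<"),
   ("3E", ">"), ("23", "#"), ("7B", "{"), ("7D", "}"), ("7C", "|"), ("5C", "\\"),
   ("5E", "^"), ("7E", "~"), ("5B", "["), ("5D", "]"), ("60", "`")]

-- `for k in table: if k == '25': continue; p = p.replace('%' + k, table[k])`, then `p.replace('%25', '%')`
def decode_parameter (p : String) : String :=
  PySem.Str.replace
    (pvTable.foldl (fun q kv => if kv.1 = "25" then q else PySem.Str.replace q ("%" ++ kv.1) kv.2) p)
    "%25" "%"

-- ===== PORT B =====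
-- Source B's table: the same codes keyed by their two characters, plus '25' → '%' (added last)
def pvAltTable : List ((Char × Char) × Char) :=
  [(('2','4'), '$'), (('2','6'), '&'), (('2','C'), ','), (('2','F'), '/'), (('3','A'), ':'),
   (('3','B'), ';'), (('3','D'), '='), (('3','F'), '?'), (('4','0'), '@'), (('2','0'), ' '),
   (('2','2'), '\"'), (('3','C'), '<'), (('3','E'), '>'), (('2','3'), '#'), (('7','B'), '{'),
   (('7','D'), '}'), (('7','C'), '|'), (('5','C'), '\\'), (('5','E'), '^'), (('7','E'), '~'),
   (('5','B'), '['), (('5','D'), ']'), (('6','0'), '`'), (('2','5'), '%')]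

-- Source B's while-loop over the index i, transcribed as structural recursion on the remaining
-- characters: on '%' followed by a known 2-char code emit the decoded char and consume 3
-- characters, otherwise emit one character and move on; the joined pieces are the result
def pvAltGo : List Char → List Char
  | [] => []
  | c :: a :: b :: rest =>
    if c = '%' then
      match pvAltTable.lookup (a, b) with
      | some ch => ch :: pvAltGo rest
      | none => c :: pvAltGo (a :: b :: rest)
    else c :: pvAltGo (a :: b :: rest)
  | c :: rest => c :: pvAltGo rest

def decode_parameter_alt (p : String) : String := String.ofList (pvAltGo p.toList)

-- ===== PRECONDITION & SPEC =====
def Spec_decode_parameter (p : String) (out : String) : Prop := out = decode_parameter_alt p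
instance (p : String) (out : String) : Decidable (Spec_decode_parameter p out) := by unfold Spec_decode_parameter; infer_instance

-- ===== CLAIM (what is proved, stated in full; the proofs are below) =====
def Claim_equal_decode_parameter : Prop := ∀ (p : String), Dom_decode_parameter p → Spec_decode_parameter p (decode_parameter p)

-- ===== LEMMAS AND PROOFS =====

-- `replace.go` with enough fuel ignores the accumulator
lemma pvGoSpec (x y ch : Char) : ∀ (fuel : Nat) (l acc : List Char), l.length ≤ fuel →
    PySem.Chars.replace.go ['%', x, y] [ch] fuel l acc
      = acc.reverse ++ PySem.Chars.replace.go ['%', x, y] [ch] l.length l [] := by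
  intro fuel
  induction fuel using Nat.strong_induction_on with
  | _ fuel ih =>
    intro l acc h
    match fuel, l with
    | 0, l =>
      have : l = [] := List.length_eq_zero_iff.mp (Nat.le_zero.mp h)
      subst this
      simp [PySem.Chars.replace.go]
    | f + 1, [] => simp [PySem.Chars.replace.go]
    | f + 1, c :: t =>
      have ht : t.length ≤ f := by simpa using h
      by_cases hp : (['%', x, y] : List Char).isPrefixOf (c :: t) = true
      · rw [PySem.Chars.replace.go]
        simp only [hp, if_pos, List.length_cons]
        conv_rhs => rw [PySem.Chars.replace.go]
        simp only [hp, if_pos]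
        rw [ih f (by omega) _ _ (show (List.drop ([].length+1+1+1) (c :: t)).length ≤ f by simp; omega),
            ih t.length (by omega) _ _ (show (List.drop (['%',x,y] : List Char).length (c :: t)).length ≤ t.length by simp)]
        simp
      · have hp' : (['%', x, y] : List Char).isPrefixOf (c :: t) = false :=
          Bool.eq_false_iff.mpr hp
        rw [PySem.Chars.replace.go]
        simp only [hp', List.length_cons, Bool.false_eq_true, if_false]
        conv_rhs => rw [PySem.Chars.replace.go]
        simp only [hp', Bool.false_eq_true, if_false]
        rw [ih f (by omega) _ _ ht, ih t.length (by omega) t [c] (le_refl t.length)]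
        simp

def pvRep (x y ch : Char) (l : List Char) : List Char := PySem.Chars.replace l ['%', x, y] [ch]

lemma pvRepNil (x y ch : Char) : pvRep x y ch [] = [] := by
  simp [pvRep, PySem.Chars.replace, PySem.Chars.replace.go]

lemma pvRepCons (x y ch c : Char) (t : List Char)
    (hp : (['%', x, y] : List Char).isPrefixOf (c :: t) = false) :
    pvRep x y ch (c :: t) = c :: pvRep x y ch t := by
  unfold pvRep
  simp only [PySem.Chars.replace, List.isEmpty_cons, Bool.false_eq_true, if_false, List.length_cons]
  rw [PySem.Chars.replace.go]
  simp only [hp, Bool.false_eq_true, if_false]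
  rw [pvGoSpec x y ch t.length t [c] (le_refl t.length)]
  simp

lemma pvRepMatch (x y ch c : Char) (t : List Char)
    (hp : (['%', x, y] : List Char).isPrefixOf (c :: t) = true) :
    pvRep x y ch (c :: t) = ch :: pvRep x y ch ((c :: t).drop 3) := by
  unfold pvRep
  simp only [PySem.Chars.replace, List.isEmpty_cons, Bool.false_eq_true, if_false, List.length_cons]
  rw [PySem.Chars.replace.go]
  simp only [hp, if_pos]
  rw [pvGoSpec x y ch t.length _ _ (by simp)]
  simp

lemma pvRepConsNe (x y ch c : Char) (t : List Char) (hc : c ≠ '%') :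
    pvRep x y ch (c :: t) = c :: pvRep x y ch t := by
  apply pvRepCons
  simp [List.isPrefixOf]
  intro h
  exact absurd h.symm hc

lemma pvRepPass3 (x y ch a b : Char) (t : List Char) (ha : a ≠ '%') (hb : b ≠ '%')
    (hxy : ¬(x = a ∧ y = b)) :
    pvRep x y ch ('%' :: a :: b :: t) = '%' :: a :: b :: pvRep x y ch t := by
  rw [pvRepCons x y ch '%' (a :: b :: t) (by
    simp [List.isPrefixOf]
    intro hx hy
    exact hxy ⟨hx, hy⟩)]
  rw [pvRepConsNe x y ch a (b :: t) ha, pvRepConsNe x y ch b t hb]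

lemma pvRepHit (a b ch : Char) (t : List Char) :
    pvRep a b ch ('%' :: a :: b :: t) = ch :: pvRep a b ch t := by
  have := pvRepMatch a b ch '%' (a :: b :: t) (by simp [List.isPrefixOf])
  simpa using this

def pvA23 : List ((Char × Char) × Char) := pvAltTable.dropLast

def pvKeyChars : List Char := ['0','2','3','4','5','6','7','A','B','C','D','E','F']

def pvNoKey (t : List Char) : Prop := ∀ a b u, t = a :: b :: u → pvAltTable.lookup (a, b) = none

def pvFold (ps : List ((Char × Char) × Char)) (s : List Char) : List Char :=
  ps.foldl (fun q kv => pvRep kv.1.1 kv.1.2 kv.2 q) s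

def pvLA (s : List Char) : List Char := pvRep '2' '5' '%' (pvFold pvA23 s)

lemma pvSplit : pvAltTable = pvA23 ++ [(('2','5'), '%')] := rfl

-- a successful lookup only happens on code characters
lemma pvLkMem (a b : Char) (ch : Char) (h : pvAltTable.lookup (a, b) = some ch) :
    ((a, b), ch) ∈ pvAltTable ∧ a ∈ pvKeyChars ∧ b ∈ pvKeyChars := by
  obtain ⟨l₁, l₂, he, -⟩ := List.lookup_eq_some_iff.mp h
  have hm : ((a, b), ch) ∈ pvAltTable := by rw [he]; exact List.mem_append_right _ (List.mem_cons_self)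
  refine ⟨hm, ?_⟩
  have : ((a,b),ch) ∈ pvAltTable := hm
  simp [pvAltTable] at this
  rcases this with ⟨⟨rfl,rfl⟩,rfl⟩|⟨⟨rfl,rfl⟩,rfl⟩|⟨⟨rfl,rfl⟩,rfl⟩|⟨⟨rfl,rfl⟩,rfl⟩|⟨⟨rfl,rfl⟩,rfl⟩|⟨⟨rfl,rfl⟩,rfl⟩|⟨⟨rfl,rfl⟩,rfl⟩|⟨⟨rfl,rfl⟩,rfl⟩|⟨⟨rfl,rfl⟩,rfl⟩|⟨⟨rfl,rfl⟩,rfl⟩|⟨⟨rfl,rfl⟩,rfl⟩|⟨⟨rfl,rfl⟩,rfl⟩|⟨⟨rfl,rfl⟩,rfl⟩|⟨⟨rfl,rfl⟩,rfl⟩|⟨⟨rfl,rfl⟩,rfl⟩|⟨⟨rfl,rfl⟩,rfl⟩|⟨⟨rfl,rfl⟩,rfl⟩|⟨⟨rfl,rfl⟩,rfl⟩|⟨⟨rfl,rfl⟩,rfl⟩|⟨⟨rfl,rfl⟩,rfl⟩|⟨⟨rfl,rfl⟩,rfl⟩|⟨⟨rfl,rfl⟩,rfl⟩|⟨⟨rfl,rfl⟩,rfl⟩|⟨⟨rfl,rfl⟩,rfl⟩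 <;> decide

lemma pvLkNoneLeft (a b : Char) (ha : a ∉ pvKeyChars) : pvAltTable.lookup (a, b) = none := by
  cases hlk : pvAltTable.lookup (a, b) with
  | none => rfl
  | some ch => exact absurd (pvLkMem a b ch hlk).2.1 ha

lemma pvLkNoneRight (a b : Char) (hb : b ∉ pvKeyChars) : pvAltTable.lookup (a, b) = none := by
  cases hlk : pvAltTable.lookup (a, b) with
  | none => rfl
  | some ch => exact absurd (pvLkMem a b ch hlk).2.2 hb

lemma pvFoldNil : ∀ ps, pvFold ps [] = [] := by
  intro ps
  induction ps with
  | nil => rfl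
  | cons kv ps ih => simp [pvFold, List.foldl] at ih ⊢; rw [pvRepNil]; exact ih

lemma pvFoldConsNe (c : Char) (hc : c ≠ '%') :
    ∀ ps s, pvFold ps (c :: s) = c :: pvFold ps s := by
  intro ps
  induction ps with
  | nil => intro s; rfl
  | cons kv ps ih =>
    intro s
    simp only [pvFold, List.foldl] at ih ⊢
    rw [pvRepConsNe _ _ _ _ _ hc]
    exact ih _

lemma pvFoldPass3 (a b : Char) (ha : a ≠ '%') (hb : b ≠ '%') :
    ∀ ps, (∀ kv ∈ ps, kv.1 ≠ (a, b)) →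
      ∀ rest, pvFold ps ('%' :: a :: b :: rest) = '%' :: a :: b :: pvFold ps rest := by
  intro ps
  induction ps with
  | nil => intro _ rest; rfl
  | cons kv ps ih =>
    intro hk rest
    simp only [pvFold, List.foldl] at ih ⊢
    rw [pvRepPass3 _ _ _ _ _ _ ha hb (by
      intro ⟨h1, h2⟩
      exact hk kv (List.mem_cons_self) (by
        have : kv.1 = (kv.1.1, kv.1.2) := rfl
        rw [this, h1, h2]))]
    exact ih (fun kv' h => hk kv' (List.mem_cons_of_mem _ h)) (pvRep kv.1.1 kv.1.2 kv.2 rest)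

-- the hit: first-match replacement of a known code, remaining passes skip over the result
lemma pvFoldHit (a b ch : Char) (ha : a ≠ '%') (hb : b ≠ '%') :
    ∀ ps, ((a, b), ch) ∈ ps → (ps.map Prod.fst).Nodup →
      (∀ kv ∈ ps, kv.2 ≠ '%') →
      ∀ rest, pvFold ps ('%' :: a :: b :: rest) = ch :: pvFold ps rest := by
  intro ps
  induction ps with
  | nil => intro h; simp at h
  | cons kv ps ih =>
    intro hmem hnd hrep rest
    by_cases hk : kv.1 = (a, b)
    · -- this entry is the code: it fires, kv.2 = ch
      have hnotin : (a, b) ∉ ps.map Prod.fst := by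
        simp only [List.map_cons, List.nodup_cons] at hnd
        rw [← hk]; exact hnd.1
      have hkv : kv = ((a, b), ch) := by
        rcases List.mem_cons.mp hmem with h | h
        · exact h.symm
        · exact absurd (List.mem_map_of_mem (f := Prod.fst) h) hnotin
      subst hkv
      simp only [pvFold, List.foldl] at ih ⊢
      rw [pvRepHit]
      exact pvFoldConsNe ch (hrep _ (List.mem_cons_self)) ps (pvRep a b ch rest)
    · -- a different code: this pass slides over '%ab' unchanged
      have hmem' : ((a, b), ch) ∈ ps := by
        rcases List.mem_cons.mp hmem with h | h
        · exact absurd (congrArg Prod.fst h.symm) hk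
        · exact h
      have hnd' : (ps.map Prod.fst).Nodup := by
        simp only [List.map_cons, List.nodup_cons] at hnd
        exact hnd.2
      simp only [pvFold, List.foldl] at ih ⊢
      rw [pvRepPass3 _ _ _ _ _ _ ha hb (by
        intro ⟨h1, h2⟩
        exact hk (by rw [show kv.1 = (kv.1.1, kv.1.2) from rfl, h1, h2]))]
      exact ih hmem' hnd' (fun kv' h => hrep kv' (List.mem_cons_of_mem _ h)) (pvRep kv.1.1 kv.1.2 kv.2 rest)

-- replacement characters never create a new code pair
lemma pvNkRep (x y ch : Char) (hch : ch ∉ pvKeyChars) :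
    ∀ t, pvNoKey t → pvNoKey (pvRep x y ch t) := by
  intro t hnk a b u heq
  cases t with
  | nil => rw [pvRepNil] at heq; exact absurd heq (by simp)
  | cons c t' =>
    by_cases hp : (['%', x, y] : List Char).isPrefixOf (c :: t') = true
    · rw [pvRepMatch _ _ _ _ _ hp] at heq
      obtain ⟨rfl, -⟩ := List.cons.inj heq
      exact pvLkNoneLeft _ _ hch
    · rw [pvRepCons _ _ _ _ _ (Bool.eq_false_iff.mpr hp)] at heq
      obtain ⟨rfl, heq'⟩ := List.cons.inj heq
      cases t' with
      | nil => rw [pvRepNil] at heq'; exact absurd heq' (by simp)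
      | cons d u' =>
        by_cases hp2 : (['%', x, y] : List Char).isPrefixOf (d :: u') = true
        · rw [pvRepMatch _ _ _ _ _ hp2] at heq'
          obtain ⟨rfl, -⟩ := List.cons.inj heq'
          exact pvLkNoneRight _ _ hch
        · rw [pvRepCons _ _ _ _ _ (Bool.eq_false_iff.mpr hp2)] at heq'
          obtain ⟨rfl, -⟩ := List.cons.inj heq'
          exact hnk _ _ u' rfl

-- with no code after it, a '%' is slid over by any pass for a real code
lemma pvNkPass (x y ch : Char) (hx : (pvAltTable.lookup (x, y)).isSome = true) :
    ∀ t, pvNoKey t → pvRep x y ch ('%' :: t) = '%' :: pvRep x y ch t := by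
  intro t hnk
  apply pvRepCons
  match t with
  | [] => simp [List.isPrefixOf]
  | [d] => simp [List.isPrefixOf]
  | d :: e :: u =>
    simp only [List.isPrefixOf, Bool.and_eq_false_iff]
    by_cases hd : x = d
    · by_cases he : y = e
      · subst hd; subst he
        rw [hnk x y u rfl] at hx
        simp at hx
      · right; right; left; simpa using he
    · right; left; simpa using hd

lemma pvFoldPassNk :
    ∀ ps, (∀ kv ∈ ps, (pvAltTable.lookup kv.1).isSome = true ∧ kv.2 ∉ pvKeyChars) →
      ∀ t, pvNoKey t →
        pvFold ps ('%' :: t) = '%' :: pvFold ps t ∧ pvNoKey (pvFold ps t) := by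
  intro ps
  induction ps with
  | nil => exact fun _ t hnk => ⟨rfl, hnk⟩
  | cons kv ps ih =>
    intro hps t hnk
    have hkv := hps kv (List.mem_cons_self)
    have h1 : (pvAltTable.lookup (kv.1.1, kv.1.2)).isSome = true := by
      have : kv.1 = (kv.1.1, kv.1.2) := rfl
      rw [← this]; exact hkv.1
    have hpass := pvNkPass kv.1.1 kv.1.2 kv.2 h1 t hnk
    have hnk' := pvNkRep kv.1.1 kv.1.2 kv.2 hkv.2 t hnk
    have := ih (fun kv' h => hps kv' (List.mem_cons_of_mem _ h)) (pvRep kv.1.1 kv.1.2 kv.2 t) hnk'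
    simp only [pvFold, List.foldl] at this ⊢
    rw [hpass]
    exact this

lemma pvAltGoConsNe (c : Char) (hc : c ≠ '%') (rest : List Char) :
    pvAltGo (c :: rest) = c :: pvAltGo rest := by
  match rest with
  | [] => rfl
  | [a] => rfl
  | a :: b :: r => rw [pvAltGo.eq_def]; simp [hc]

lemma pvAltGoSome (a b ch : Char) (rest : List Char) (h : pvAltTable.lookup (a, b) = some ch) :
    pvAltGo ('%' :: a :: b :: rest) = ch :: pvAltGo rest := by
  rw [pvAltGo.eq_def]; simp [h]

lemma pvAltGoNone (a b : Char) (rest : List Char) (h : pvAltTable.lookup (a, b) = none) :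
    pvAltGo ('%' :: a :: b :: rest) = '%' :: pvAltGo (a :: b :: rest) := by
  rw [pvAltGo.eq_def]; simp [h]

lemma pvMain : ∀ (n : Nat) (s : List Char), s.length ≤ n → pvLA s = pvAltGo s := by
  have Cpass : ∀ kv ∈ pvA23, (pvAltTable.lookup kv.1).isSome = true ∧ kv.2 ∉ pvKeyChars := by decide
  have Crep : ∀ kv ∈ pvA23, kv.2 ≠ '%' := by decide
  have Cnodup : (pvA23.map Prod.fst).Nodup := by decide
  have Cne25 : ∀ kv ∈ pvA23, kv.1 ≠ ('2', '5') := by decide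
  have Ccomp : ∀ kv ∈ pvA23, kv.1.1 ≠ '%' ∧ kv.1.2 ≠ '%' := by decide
  have h25s : (pvAltTable.lookup ('2', '5')).isSome = true := by decide
  -- the shared '%'-with-no-following-code path
  have nkpath : ∀ (n : Nat), (∀ s' : List Char, s'.length ≤ n → pvLA s' = pvAltGo s') →
      ∀ t : List Char, t.length ≤ n → pvNoKey t → pvLA ('%' :: t) = '%' :: pvAltGo t := by
    intro n ih t htl hnk
    obtain ⟨hpass, hnk'⟩ := pvFoldPassNk pvA23 Cpass t hnk
    simp only [pvLA]
    rw [hpass, pvNkPass '2' '5' '%' h25s _ hnk', ← pvLA, ih t htl]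
  intro n
  induction n with
  | zero =>
    intro s h
    have : s = [] := List.length_eq_zero_iff.mp (Nat.le_zero.mp h)
    subst this
    simp [pvLA, pvFoldNil, pvRepNil, pvAltGo]
  | succ n ih =>
    intro s h
    cases s with
    | nil => simp [pvLA, pvFoldNil, pvRepNil, pvAltGo]
    | cons c t =>
      have htl : t.length ≤ n := by simpa using h
      by_cases hc : c = '%'
      · subst hc
        cases t with
        | nil => rw [nkpath n ih [] (by simp) (by intro a b u hu; simp at hu)]; rfl
        | cons a t2 =>
          cases t2 with
          | nil =>
            rw [nkpath n ih [a] (by simpa using htl) (by intro x y u hu; simp at hu)]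
            rfl
          | cons b u =>
            cases hlk : pvAltTable.lookup (a, b) with
            | none =>
              rw [nkpath n ih (a :: b :: u) htl (by
                intro x y v hv
                obtain ⟨rfl, hv'⟩ := List.cons.inj hv
                obtain ⟨rfl, -⟩ := List.cons.inj hv'
                exact hlk)]
              rw [pvAltGoNone a b u hlk]
            | some ch =>
              have hu : u.length ≤ n := by simp at h; omega
              by_cases h25 : (a, b) = ('2', '5')
              · obtain ⟨rfl, rfl⟩ : a = '2' ∧ b = '5' := Prod.mk.inj h25
                have hch : ch = '%' := by
                  have h2 : pvAltTable.lookup ('2', '5') = some '%' := by decide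
                  rw [h2] at hlk
                  exact (Option.some.inj hlk).symm
                subst hch
                simp only [pvLA]
                rw [pvFoldPass3 '2' '5' (by decide) (by decide) pvA23 Cne25 u,
                    pvRepHit, ← pvLA, ih u hu, pvAltGoSome _ _ _ _ hlk]
              · have hmem : ((a, b), ch) ∈ pvAltTable := (pvLkMem a b ch hlk).1
                have hmem23 : ((a, b), ch) ∈ pvA23 := by
                  rw [pvSplit] at hmem
                  rcases List.mem_append.mp hmem with hm | hm
                  · exact hm
                  · exfalso
                    simp at hm
                    exact h25 (by rw [hm.1.1, hm.1.2])
                have hcomp := Ccomp _ hmem23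
                have hchne : ch ≠ '%' := Crep _ hmem23
                simp only [pvLA]
                rw [pvFoldHit a b ch hcomp.1 hcomp.2 pvA23 hmem23 Cnodup Crep u,
                    pvRepConsNe _ _ _ _ _ hchne, ← pvLA, ih u hu, pvAltGoSome _ _ _ _ hlk]
      · rw [pvAltGoConsNe c hc t, ← ih t htl]
        simp only [pvLA]
        rw [pvFoldConsNe c hc pvA23 t, pvRepConsNe _ _ _ _ _ hc]

-- A at the character level
lemma pvPortA_list (p : String) : (decode_parameter p).toList = pvLA p.toList := by
  simp [decode_parameter, pvTable, pvLA, pvFold, pvA23, pvAltTable, pvRep,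
        PySem.Str.toList_replace]

-- ===== VERDICT (by name: the statement is the Claim_ definition above) =====
theorem decode_parameter_spec : Claim_equal_decode_parameter := by
  unfold Claim_equal_decode_parameter Spec_decode_parameter
  intro p _
  apply String.toList_inj.mp
  rw [pvPortA_list]
  simp only [decode_parameter_alt, String.toList_ofList]
  exact pvMain p.toList.length p.toList le_rfl
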